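-- pv_equiv track=rewrite | github.com/huangyingw/submissions | 1300.sum-of-mutated-array-closest-to-target.293556359.Accepted.leetcode.python3.py | findBestValue
-- ===== SOURCE A (Python) =====
-- def findBestValue(arr, target):
--     low, high = 0, max(arr)
--
--     def ceiling(x):
--         return sum(min(a, x) for a in arr)
--     while low < high:
--         mid = (low + high) // 2
--         value = ceiling(mid) - target
--         if value >= 0:
--             high = mid
--         else:
--             low = mid + 1
--     value = ceiling(low) - target
--     lower = ceiling(low - 1) - target
--     return low - 1 if abs(lower) <= abs(value) else low
-- ===== SOURCE B (Python) =====
-- def findBestValue(arr, target):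
--     # sort once + prefix sums: each ceiling query becomes an O(log n) binary search
--     s = sorted(arr)
--     n = len(s)
--     prefix = [0]
--     for a in s:
--         prefix.append(prefix[-1] + a)
--
--     def ceiling(x):
--         lo, hi = 0, n
--         while lo < hi:
--             mid = (lo + hi) // 2
--             if s[mid] <= x:
--                 lo = mid + 1
--             else:
--                 hi = mid
--         return prefix[lo] + (n - lo) * x
--
--     low, high = 0, s[-1]
--     while low < high:
--         mid = low + (high - low) // 2
--         if ceiling(mid) < target:
--             low = mid + 1
--         else:
--             high = mid
--     return low if abs(ceiling(low) - target) < abs(ceiling(low - 1) - target) else low - 1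
-- ===== Notes on version B (the rewrite author's own statement) =====
-- stated objective: faster
-- what changed: B sorts the array once and builds prefix sums, so each ceiling(x) query inside the binary search over the cap value is an O(log n) index binary search instead of A's O(n) full scan of the array.
import Mathlib
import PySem

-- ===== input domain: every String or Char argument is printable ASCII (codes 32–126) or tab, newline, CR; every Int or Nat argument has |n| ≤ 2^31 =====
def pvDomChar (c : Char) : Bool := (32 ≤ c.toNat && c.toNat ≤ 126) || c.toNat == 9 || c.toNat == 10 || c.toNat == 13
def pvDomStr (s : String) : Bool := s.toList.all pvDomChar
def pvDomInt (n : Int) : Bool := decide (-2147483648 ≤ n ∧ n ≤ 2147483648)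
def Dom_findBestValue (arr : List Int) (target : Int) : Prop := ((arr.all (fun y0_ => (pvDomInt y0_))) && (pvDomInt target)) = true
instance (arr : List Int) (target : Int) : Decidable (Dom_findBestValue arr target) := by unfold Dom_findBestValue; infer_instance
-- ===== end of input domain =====

-- B sorts once and uses prefix sums + an index binary search per ceiling query, replacing A's O(n) scan per query.

-- ===== PORT A =====
-- sum(min(a, x) for a in arr)
def ceilingA (arr : List Int) (x : Int) : Int := (arr.map (fun a => min a x)).sum

-- while low < high: binary search over the cap value
def loopA (arr : List Int) (target : Int) (low high : Int) : Int :=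
  if _h : low < high then
    let mid := PySem.Int.floordiv (low + high) 2
    if ceilingA arr mid - target ≥ 0 then loopA arr target low mid
    else loopA arr target (mid + 1) high
  else low
termination_by (high - low).toNat
decreasing_by
  · have hb := PySem.Int.floordiv_two_mid_bounds (le_of_lt _h)
    have := PySem.Int.floordiv_lt_iff_lt_mul (a := low + high) (q := high) (b := 2) (by omega)
    omega
  · have hb := PySem.Int.floordiv_two_mid_bounds (le_of_lt _h)
    have := PySem.Int.floordiv_lt_iff_lt_mul (a := low + high) (q := high) (b := 2) (by omega)
    omega

def findBestValue (arr : List Int) (target : Int) : Int :=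
  let high := (PySem.List.max? arr (fun x => x)).getD 0  -- max(arr); ValueError on [] is excluded by Pre_
  let low := loopA arr target 0 high
  let value := ceilingA arr low - target
  let lower := ceilingA arr (low - 1) - target
  if |lower| ≤ |value| then low - 1 else low

-- ===== PORT B =====
-- hand-written bisect_right of Source B: lo, hi index binary search; s[mid] is always in range here
def bisectB (s : List Int) (x : Int) (lo hi : Int) : Int :=
  if _h : lo < hi then
    let mid := PySem.Int.floordiv (lo + hi) 2
    if PySem.List.pyGetD s mid 0 ≤ x then bisectB s x (mid + 1) hi
    else bisectB s x lo mid
  else lo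
termination_by (hi - lo).toNat
decreasing_by
  · have hb := PySem.Int.floordiv_two_mid_bounds (le_of_lt _h)
    have := PySem.Int.floordiv_lt_iff_lt_mul (a := lo + hi) (q := hi) (b := 2) (by omega)
    omega
  · have hb := PySem.Int.floordiv_two_mid_bounds (le_of_lt _h)
    have := PySem.Int.floordiv_lt_iff_lt_mul (a := lo + hi) (q := hi) (b := 2) (by omega)
    omega

-- prefix = [0]; for a in s: prefix.append(prefix[-1] + a)
def prefixB (s : List Int) : List Int :=
  s.foldl (fun p a => p ++ [PySem.List.pyGetD p (-1) 0 + a]) [0]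

-- return prefix[lo] + (n - lo) * x  with lo = bisect result; prefix[lo] always in range here
def ceilingB (s pre : List Int) (n x : Int) : Int :=
  let k := bisectB s x 0 n
  PySem.List.pyGetD pre k 0 + (n - k) * x

def loopB (s pre : List Int) (n target low high : Int) : Int :=
  if _h : low < high then
    let mid := low + PySem.Int.floordiv (high - low) 2
    if ceilingB s pre n mid < target then loopB s pre n target (mid + 1) high
    else loopB s pre n target low mid
  else low
termination_by (high - low).toNat
decreasing_by
  · have hb := PySem.Int.floordiv_two_mid_bounds (lo := 0) (hi := high - low) (by omega)
    have := PySem.Int.floordiv_lt_iff_lt_mul (a := high - low) (q := high - low) (b := 2)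
      (by omega)
    simp only [zero_add] at hb
    omega
  · have hb := PySem.Int.floordiv_two_mid_bounds (lo := 0) (hi := high - low) (by omega)
    have := PySem.Int.floordiv_lt_iff_lt_mul (a := high - low) (q := high - low) (b := 2)
      (by omega)
    simp only [zero_add] at hb
    omega

def findBestValue_alt (arr : List Int) (target : Int) : Int :=
  let s := PySem.List.sorted arr (fun x => x) false
  let n : Int := s.length
  let pre := prefixB s
  let high := PySem.List.pyGetD s (-1) 0  -- s[-1]; IndexError on [] is excluded by Pre_
  let low := loopB s pre n target 0 high
  if |ceilingB s pre n low - target| < |ceilingB s pre n (low - 1) - target| then low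
  else low - 1

-- ===== PRECONDITION & SPEC =====
-- A raises ValueError on max([]) for the empty list (and B's s[-1] raises IndexError there): arr = [] is excluded.
def Pre_findBestValue (arr : List Int) (target : Int) : Prop := arr ≠ []
instance (arr : List Int) (target : Int) : Decidable (Pre_findBestValue arr target) := by unfold Pre_findBestValue; infer_instance
def pvWitness_findBestValue : List Int × Int := ([4, 2, 9], 10)

def Spec_findBestValue (arr : List Int) (target : Int) (out : Int) : Prop := out = findBestValue_alt arr target
instance (arr : List Int) (target : Int) (out : Int) : Decidable (Spec_findBestValue arr target out) := by unfold Spec_findBestValue; infer_instance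

-- ===== CLAIM (what is proved, stated in full; the proofs are below) =====
def Claim_equal_findBestValue : Prop := ∀ (arr : List Int) (target : Int), Dom_findBestValue arr target → Pre_findBestValue arr target → Spec_findBestValue arr target (findBestValue arr target)

-- ===== LEMMAS AND PROOFS =====

theorem sortedSplit (x : Int) : ∀ (s : List Int), s.Pairwise (· ≤ ·) →
    (∀ a ∈ s.take (s.countP (fun a => decide (a ≤ x))), a ≤ x) ∧
    (∀ a ∈ s.drop (s.countP (fun a => decide (a ≤ x))), x < a) := by
  intro s hs
  induction s with
  | nil => simp
  | cons a t ih =>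
    rcases List.pairwise_cons.mp hs with ⟨ha, ht⟩
    rcases ih ht with ⟨ih1, ih2⟩
    by_cases hax : a ≤ x
    · simp [hax]
      constructor
      · exact ih1
      · exact ih2
    · have h0 : (a :: t).countP (fun a => decide (a ≤ x)) = 0 := by
        apply List.countP_eq_zero.mpr
        intro b hb
        simp only [decide_eq_true_eq]
        rcases List.mem_cons.mp hb with rfl | hbt
        · exact hax
        · intro hbx; exact hax (le_trans (ha b hbt) hbx)
      rw [h0]
      refine ⟨by simp, ?_⟩
      intro b hb
      simp only [List.drop_zero] at hb
      rcases List.mem_cons.mp hb with rfl | hbt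
      · omega
      · have := ha b hbt; omega

theorem bisectB_eq (s : List Int) (x : Int) (hs : s.Pairwise (· ≤ ·)) :
    ∀ (m : Nat) (lo hi : Int), (hi - lo).toNat ≤ m → 0 ≤ lo → hi ≤ (s.length : Int) →
    lo ≤ (s.countP (fun a => decide (a ≤ x)) : Int) →
    (s.countP (fun a => decide (a ≤ x)) : Int) ≤ hi →
    bisectB s x lo hi = (s.countP (fun a => decide (a ≤ x)) : Int) := by
  intro m
  induction m with
  | zero =>
    intro lo hi hm h0 hn hK1 hK2
    rw [bisectB, dif_neg (by omega)]
    omega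
  | succ m ih =>
    intro lo hi hm h0 hn hK1 hK2
    by_cases hlh : lo < hi
    · rw [bisectB, dif_pos hlh]
      have hb := PySem.Int.floordiv_two_mid_bounds (le_of_lt hlh)
      have hlt := PySem.Int.floordiv_lt_iff_lt_mul (a := lo + hi) (q := hi) (b := 2) (by omega)
      set mid := PySem.Int.floordiv (lo + hi) 2 with hmid
      have hmlt : mid < hi := by omega
      have hm0 : 0 ≤ mid := by omega
      have hmlen : mid < (s.length : Int) := by omega
      have hget : PySem.List.pyGetD s mid 0 = s[mid.toNat] :=
        PySem.List.pyGetD_eq_getElem s 0 hm0 hmlen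
      rcases sortedSplit x s hs with ⟨htake, hdrop⟩
      set K := s.countP (fun a => decide (a ≤ x)) with hKdef
      by_cases hc : PySem.List.pyGetD s mid 0 ≤ x
      · rw [if_pos hc]
        have hmK : mid < (K : Int) := by
          by_contra hKm
          push Not at hKm
          have hmem : s[mid.toNat] ∈ s.drop K := by
            have hj : mid.toNat - K < (s.drop K).length := by
              simp [List.length_drop]; omega
            have := List.getElem_drop (xs := s) (i := K) (j := mid.toNat - K)
              (h := hj)
            have heq : s[K + (mid.toNat - K)]'(by simp at hj ⊢; omega) = s[mid.toNat] := by
              congr 1; omega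
            rw [heq] at this
            rw [← this]
            exact List.getElem_mem _
          have := hdrop _ hmem
          rw [hget] at hc
          omega
        exact ih (mid + 1) hi (by omega) (by omega) hn (by omega) hK2
      · rw [if_neg hc]
        have hKm : (K : Int) ≤ mid := by
          by_contra hmK
          push Not at hmK
          have hmem : s[mid.toNat] ∈ s.take K := by
            have := List.getElem_take (xs := s) (j := K) (i := mid.toNat)
              (h := by simp; omega)
            rw [← this]
            exact List.getElem_mem _
          have := htake _ hmem
          rw [hget] at hc
          omega
        exact ih lo mid (by omega) h0 (by omega) hK1 (by omega)
    · rw [bisectB, dif_neg hlh]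
      omega

theorem ceilingA_allgt (x : Int) (s : List Int) (h : ∀ a ∈ s, x < a) :
    ceilingA s x = (s.length : Int) * x := by
  induction s with
  | nil => simp [ceilingA]
  | cons a t ih =>
    have hx : x < a := h a (by simp)
    have : ceilingA t x = (t.length : Int) * x := ih (fun b hb => h b (by simp [hb]))
    simp only [ceilingA, List.map_cons, List.sum_cons] at *
    rw [this, min_eq_right (le_of_lt hx)]
    simp only [List.length_cons]
    push_cast
    ring


theorem ceilingA_sorted (x : Int) : ∀ (s : List Int), s.Pairwise (· ≤ ·) →
    ceilingA s x = (s.take (s.countP (fun a => decide (a ≤ x)))).sum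
      + ((s.length : Int) - (s.countP (fun a => decide (a ≤ x)) : Int)) * x := by
  intro s hs
  induction s with
  | nil => simp [ceilingA]
  | cons a t ih =>
    rcases List.pairwise_cons.mp hs with ⟨ha, ht⟩
    by_cases hax : a ≤ x
    · have := ih ht
      simp only [ceilingA, List.map_cons, List.sum_cons] at *
      simp [hax, this]
      ring
    · have h0 : (a :: t).countP (fun a => decide (a ≤ x)) = 0 := by
        apply List.countP_eq_zero.mpr
        intro b hb
        simp only [decide_eq_true_eq]
        rcases List.mem_cons.mp hb with rfl | hbt
        · exact hax
        · intro hbx; exact hax (le_trans (ha b hbt) hbx)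
      rw [h0, ceilingA_allgt x (a :: t) ?_]
      · simp
      · intro b hb
        rcases List.mem_cons.mp hb with rfl | hbt
        · omega
        · have := ha b hbt; omega


def tails (c : Int) : List Int → List Int
  | [] => []
  | a :: t => (c + a) :: tails (c + a) t


theorem foldl_pref : ∀ (t : List Int) (p : List Int) (c : Int),
    t.foldl (fun p a => p ++ [PySem.List.pyGetD p (-1) 0 + a]) (p ++ [c])
      = (p ++ [c]) ++ tails c t := by
  intro t
  induction t with
  | nil => simp [tails]
  | cons a t ih =>
    intro p c
    simp only [List.foldl_cons, PySem.List.pyGetD_neg_one_append_singleton, tails]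
    have := ih (p ++ [c]) (c + a)
    simp only [List.append_assoc] at *
    simpa using this


theorem prefixB_eq (s : List Int) : prefixB s = 0 :: tails 0 s := by
  have := foldl_pref s [] 0
  simpa [prefixB] using this


theorem tails_getD : ∀ (t : List Int) (c : Int) (k : Nat), k ≤ t.length →
    (c :: tails c t).getD k 0 = c + (t.take k).sum := by
  intro t
  induction t with
  | nil => intro c k hk; simp at hk; subst hk; simp
  | cons a t ih =>
    intro c k hk
    cases k with
    | zero => simp
    | succ k =>
      simp only [tails, List.getD_cons_succ, List.take_succ_cons, List.sum_cons]
      rw [ih (c + a) k (by simpa using hk)]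
      ring


theorem prefixB_getD (s : List Int) (k : Nat) (hk : k ≤ s.length) :
    PySem.List.pyGetD (prefixB s) (k : Int) 0 = (s.take k).sum := by
  rw [PySem.List.pyGetD_natCast, prefixB_eq]
  simpa using tails_getD s 0 k hk

theorem ceilingB_eq_sorted (s : List Int) (hs : s.Pairwise (· ≤ ·)) (x : Int) :
    ceilingB s (prefixB s) (s.length : Int) x = ceilingA s x := by
  have hK1 : s.countP (fun a => decide (a ≤ x)) ≤ s.length := List.countP_le_length
  have hb := bisectB_eq s x hs (s.length) 0 (s.length : Int) (by omega) (by omega)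
    (by omega) (by exact_mod_cast Int.natCast_nonneg _) (by exact_mod_cast hK1)
  simp only [ceilingB, hb]
  rw [prefixB_getD s _ hK1, ceilingA_sorted x s hs]

theorem ceilingA_perm (arr : List Int) (x : Int) :
    ceilingA (PySem.List.sorted arr (fun x => x) false) x = ceilingA arr x := by
  unfold ceilingA
  exact List.Perm.sum_eq (List.Perm.map _ (PySem.List.sorted_perm arr (fun x => x) false))

theorem mid_shift (lo hi : Int) (_h : lo < hi) :
    lo + PySem.Int.floordiv (hi - lo) 2 = PySem.Int.floordiv (lo + hi) 2 := by
  have h1 := (PySem.Int.floordiv_eq_iff_of_pos (a := hi - lo) (b := (2 : Int))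
    (q := PySem.Int.floordiv (hi - lo) 2) (by omega)).mp rfl
  exact ((PySem.Int.floordiv_eq_iff_of_pos (a := lo + hi) (b := (2 : Int))
    (q := lo + PySem.Int.floordiv (hi - lo) 2) (by omega)).mpr (by omega)).symm

theorem loop_eq (arr : List Int) (s pre : List Int) (n target : Int)
    (hceil : ∀ y, ceilingB s pre n y = ceilingA arr y) :
    ∀ (m : Nat) (low high : Int), (high - low).toNat ≤ m →
      loopB s pre n target low high = loopA arr target low high := by
  intro m
  induction m with
  | zero =>
    intro low high hm
    rw [loopB, loopA]
    have : ¬ low < high := by omega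
    rw [dif_neg this, dif_neg this]
  | succ m ih =>
    intro low high hm
    rw [loopB, loopA]
    by_cases hlh : low < high
    · rw [dif_pos hlh, dif_pos hlh]
      simp only [hceil, mid_shift low high hlh]
      have hb := PySem.Int.floordiv_two_mid_bounds (le_of_lt hlh)
      have hlt := PySem.Int.floordiv_lt_iff_lt_mul (a := low + high) (q := high) (b := 2)
        (by omega)
      set mid := PySem.Int.floordiv (low + high) 2 with hmid
      by_cases hc : ceilingA arr mid - target ≥ 0
      · rw [if_neg (by omega), if_pos hc]
        exact ih low mid (by omega)
      · rw [if_pos (by omega), if_neg hc]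
        exact ih (mid + 1) high (by omega)
    · rw [dif_neg hlh, dif_neg hlh]

theorem last_is_max : ∀ (s : List Int), s.Pairwise (· ≤ ·) → ∀ (h : s ≠ []),
    ∀ a ∈ s, a ≤ s.getLast h := by
  intro s
  induction s with
  | nil => intro _ h; exact absurd rfl h
  | cons a t ih =>
    intro hs h b hb
    rcases List.pairwise_cons.mp hs with ⟨ha, ht⟩
    cases t with
    | nil => simp at hb; simp [hb]
    | cons c u =>
      rw [List.getLast_cons (by simp)]
      rcases List.mem_cons.mp hb with rfl | hbt
      · exact le_trans (le_refl b) (ha _ (List.getLast_mem _))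
      · exact ih ht (by simp) b hbt

theorem high_eq (arr : List Int) (h : arr ≠ []) :
    PySem.List.pyGetD (PySem.List.sorted arr (fun x => x) false) (-1) 0
      = (PySem.List.max? arr (fun x => x)).getD 0 := by
  have hsne : PySem.List.sorted arr (fun x => x) false ≠ [] := by
    intro he
    have := PySem.List.length_sorted arr (fun x => x) false
    rw [he] at this
    exact h (List.eq_nil_of_length_eq_zero this.symm)
  rw [PySem.List.pyGetD_neg_one _ 0 hsne]
  obtain ⟨m, hm⟩ : ∃ m, PySem.List.max? arr (fun x => x) = some m := by
    cases he : PySem.List.max? arr (fun x => x) with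
    | none => exact absurd ((PySem.List.max?_eq_none_iff arr _).mp he) h
    | some m => exact ⟨m, rfl⟩
  rw [hm]
  have hs : (PySem.List.sorted arr (fun x => x) false).Pairwise (· ≤ ·) :=
    PySem.List.sorted_pairwise arr (fun x => x)
  have h1 : (PySem.List.sorted arr (fun x => x) false).getLast hsne ≤ m := by
    apply PySem.List.max?_isMax hm
    exact (PySem.List.mem_sorted arr (fun x => x) false _).mp (List.getLast_mem hsne)
  have h2 : m ≤ (PySem.List.sorted arr (fun x => x) false).getLast hsne := by
    apply last_is_max _ hs hsne
    exact (PySem.List.mem_sorted arr (fun x => x) false m).mpr (PySem.List.max?_mem hm)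
  simp
  omega

-- ===== VERDICT (by name: the statement is the Claim_ definition above) =====
theorem findBestValue_spec : Claim_equal_findBestValue := by
  intro arr target _hdom hpre
  unfold Spec_findBestValue findBestValue findBestValue_alt
  have hs : (PySem.List.sorted arr (fun x => x) false).Pairwise (· ≤ ·) :=
    PySem.List.sorted_pairwise arr (fun x => x)
  have hceil : ∀ y, ceilingB (PySem.List.sorted arr (fun x => x) false)
      (prefixB (PySem.List.sorted arr (fun x => x) false))
      (((PySem.List.sorted arr (fun x => x) false).length : Int)) y = ceilingA arr y := by
    intro y
    rw [ceilingB_eq_sorted _ hs y, ceilingA_perm]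
  have hloop : ∀ low high, loopB (PySem.List.sorted arr (fun x => x) false)
      (prefixB (PySem.List.sorted arr (fun x => x) false))
      (((PySem.List.sorted arr (fun x => x) false).length : Int)) target low high
      = loopA arr target low high := fun low high =>
    loop_eq arr _ _ _ target hceil (high - low).toNat low high (le_refl _)
  simp only [high_eq arr hpre, hloop, hceil]
  split_ifs <;> omega
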